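-- pv_equiv track=rewrite | github.com/AzzzzAxyz/GitPythonista | xUnit/MyTools/tools/subtools/xaSeikai.py | TFyk_bylstdivsub_sikitiUD
-- ===== SOURCE A (Python) =====
-- def TFup_bylstdivsub_sikiti(lst_ds,sikiti):
-- 	retD=[False for i in range(len(lst_ds))]
-- 	for i,l in enumerate(lst_ds):
-- 		if l==None:retD[i]=None
-- 		elif l>sikiti:retD[i]=True
-- 	return retD
--
-- def TFdn_bylstdivsub_sikiti(lst_ds,sikiti):
-- 	retD=[False for i in range(len(lst_ds))]
-- 	for i,l in enumerate(lst_ds):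
-- 		if l==None:retD[i]=None
-- 		elif l<sikiti:retD[i]=True
-- 	return retD
--
-- def TFyk_bylstdivsub_sikitiUD(lst_ds,siki_u,siki_d):
-- 	tf_u=TFup_bylstdivsub_sikiti(lst_ds,siki_u)
-- 	tf_d=TFdn_bylstdivsub_sikiti(lst_ds,siki_d)
-- 	retD=[False for i in range(len(tf_u))]
-- 	for i,l in enumerate(tf_u):
-- 		if tf_u[i]==None:retD[i]=None
-- 		else:
-- 			tf_add=tf_u[i]+tf_d[i]
-- 			if tf_add==False:retD[i]=True
-- 	return retD
-- ===== SOURCE B (Python) =====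
-- def TFyk_bylstdivsub_sikitiUD(lst_ds, siki_u, siki_d):
-- 	# single pass: None stays None, else True iff siki_d <= l <= siki_u (inclusive)
-- 	return [None if l is None else (siki_d <= l <= siki_u) for l in lst_ds]
-- ===== Notes on version B (the rewrite author's own statement) =====
-- stated objective: simpler
-- what changed: Replaces A's two helper functions and three list-building passes (tf_u, tf_d, then an int-addition combine) with one direct pass that flags siki_d <= l <= siki_u and keeps None.
import Mathlib
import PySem

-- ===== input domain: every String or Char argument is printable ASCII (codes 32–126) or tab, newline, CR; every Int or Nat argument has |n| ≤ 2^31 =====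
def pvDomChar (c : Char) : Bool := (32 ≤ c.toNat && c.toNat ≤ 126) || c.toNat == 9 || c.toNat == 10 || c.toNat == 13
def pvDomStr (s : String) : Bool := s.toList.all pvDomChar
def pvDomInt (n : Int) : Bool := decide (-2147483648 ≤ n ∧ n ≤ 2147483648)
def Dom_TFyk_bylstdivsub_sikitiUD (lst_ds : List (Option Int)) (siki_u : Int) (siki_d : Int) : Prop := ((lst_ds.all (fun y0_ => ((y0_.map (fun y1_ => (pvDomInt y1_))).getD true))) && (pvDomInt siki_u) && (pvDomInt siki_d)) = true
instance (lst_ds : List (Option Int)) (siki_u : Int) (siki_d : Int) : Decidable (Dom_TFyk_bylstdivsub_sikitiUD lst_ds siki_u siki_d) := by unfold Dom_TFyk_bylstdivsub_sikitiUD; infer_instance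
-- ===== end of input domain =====

-- B fuses A's two helper passes and combine pass into one direct per-element pass (objective: simpler).


-- ===== PORT A =====
-- helper TFup_bylstdivsub_sikiti: retD[i] = None if l==None, True if l>sikiti, else the initial False
def TFup_bylstdivsub_sikiti (lst_ds : List (Option Int)) (sikiti : Int) : List (Option Bool) :=
  lst_ds.map (fun l => match l with
    | none => none
    | some v => if v > sikiti then some true else some false)

-- helper TFdn_bylstdivsub_sikiti: retD[i] = None if l==None, True if l<sikiti, else the initial False
def TFdn_bylstdivsub_sikiti (lst_ds : List (Option Int)) (sikiti : Int) : List (Option Bool) :=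
  lst_ds.map (fun l => match l with
    | none => none
    | some v => if v < sikiti then some true else some false)

-- combine: None if tf_u[i]==None, else True iff tf_u[i]+tf_d[i]==0 (int addition of the two bools)
def TFyk_bylstdivsub_sikitiUD (lst_ds : List (Option Int)) (siki_u : Int) (siki_d : Int) : List (Option Bool) :=
  let tf_u := TFup_bylstdivsub_sikiti lst_ds siki_u
  let tf_d := TFdn_bylstdivsub_sikiti lst_ds siki_d
  (tf_u.zip tf_d).map (fun p => match p.1 with
    | none => none
    | some bu => match p.2 with
      | none => none  -- unreachable: tf_u and tf_d are None at the same indices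
      | some bd =>
        let tf_add : Int := (if bu then 1 else 0) + (if bd then 1 else 0)
        if tf_add == 0 then some true else some false)

-- ===== PORT B =====
def TFyk_bylstdivsub_sikitiUD_alt (lst_ds : List (Option Int)) (siki_u : Int) (siki_d : Int) : List (Option Bool) :=
  lst_ds.map (fun l => match l with
    | none => none
    | some v => some (decide (siki_d ≤ v ∧ v ≤ siki_u)))

-- ===== PRECONDITION & SPEC =====
def Spec_TFyk_bylstdivsub_sikitiUD (lst_ds : List (Option Int)) (siki_u : Int) (siki_d : Int) (out : List (Option Bool)) : Prop := out = TFyk_bylstdivsub_sikitiUD_alt lst_ds siki_u siki_d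
instance (lst_ds : List (Option Int)) (siki_u : Int) (siki_d : Int) (out : List (Option Bool)) : Decidable (Spec_TFyk_bylstdivsub_sikitiUD lst_ds siki_u siki_d out) := by unfold Spec_TFyk_bylstdivsub_sikitiUD; infer_instance

-- ===== CLAIM (what is proved, stated in full; the proofs are below) =====
def Claim_equal_TFyk_bylstdivsub_sikitiUD : Prop := ∀ (lst_ds : List (Option Int)) (siki_u : Int) (siki_d : Int), Dom_TFyk_bylstdivsub_sikitiUD lst_ds siki_u siki_d → Spec_TFyk_bylstdivsub_sikitiUD lst_ds siki_u siki_d (TFyk_bylstdivsub_sikitiUD lst_ds siki_u siki_d)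

-- ===== LEMMAS AND PROOFS =====
theorem TFyk_eq (lst_ds : List (Option Int)) (siki_u : Int) (siki_d : Int) :
    TFyk_bylstdivsub_sikitiUD lst_ds siki_u siki_d = TFyk_bylstdivsub_sikitiUD_alt lst_ds siki_u siki_d := by
  induction lst_ds with
  | nil => rfl
  | cons h t ih =>
    cases h with
    | none =>
      simpa [TFyk_bylstdivsub_sikitiUD, TFup_bylstdivsub_sikiti, TFdn_bylstdivsub_sikiti,
        TFyk_bylstdivsub_sikitiUD_alt] using ih
    | some v =>
      have h' := ih
      simp [TFyk_bylstdivsub_sikitiUD, TFup_bylstdivsub_sikiti, TFdn_bylstdivsub_sikiti,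
        TFyk_bylstdivsub_sikitiUD_alt] at h' ⊢
      refine ⟨?_, h'⟩
      by_cases hu : v > siki_u <;> by_cases hd : v < siki_d <;>
        simp [hu, hd] <;> omega

-- ===== VERDICT (by name: the statement is the Claim_ definition above) =====
theorem TFyk_bylstdivsub_sikitiUD_spec : Claim_equal_TFyk_bylstdivsub_sikitiUD := by
  intro lst_ds siki_u siki_d _
  exact TFyk_eq lst_ds siki_u siki_d
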